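-- pv_equiv track=rewrite | github.com/paras-a/Data-Structures-and-Algorithms | recursion.py | count_alternating
-- ===== SOURCE A (Python) =====
-- def count_alternating(lst):
--     """
--     Count the number of elements in a list that alternate in sign (positive, negative, positive, ...) using recursion.
--
--     @param lst: A list of numbers
--     @return: The length of the longest prefix with alternating signs
--     @rtype: int
--
--     Examples:
--         >>> count_alternating([1, -2, 3, -4, 5])
--         2
--         >>> count_alternating([1, 2, -3])
--         1
--     """
--     if len(lst) == 0:
--         return 0
--     if len(lst) == 1:
--         return 1
--     count = 0
--     if lst[0] > 0 > lst[1]: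
--         count += 1
--     if lst[0] < 0 < lst[1]:
--         count += 1
--     if lst[0] > 0 and lst[1] > 0:
--         count += 1
--         return count
--     if lst[0] < 0 and lst[1] < 0:
--         count += 1
--         return count
--     return count + count_alternating(lst[1:])
-- ===== SOURCE B (Python) =====
-- def count_alternating(lst):
--     if len(lst) == 0:
--         return 0
--     count = 0
--     i = 0
--     while i < len(lst) - 1:
--         a, b = lst[i], lst[i + 1]
--         if a > 0 > b or a < 0 < b:
--             count += 1
--         elif (a > 0 and b > 0) or (a < 0 and b < 0):
--             return count + 1
--         i += 1
--     return count + 1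
-- ===== Notes on version B (the rewrite author's own statement) =====
-- stated objective: simpler
-- what changed: Replaces A's slicing recursion with a single iterative while-loop over adjacent pairs with a running counter and an early return on the first strictly-same-sign pair.
import Mathlib
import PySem

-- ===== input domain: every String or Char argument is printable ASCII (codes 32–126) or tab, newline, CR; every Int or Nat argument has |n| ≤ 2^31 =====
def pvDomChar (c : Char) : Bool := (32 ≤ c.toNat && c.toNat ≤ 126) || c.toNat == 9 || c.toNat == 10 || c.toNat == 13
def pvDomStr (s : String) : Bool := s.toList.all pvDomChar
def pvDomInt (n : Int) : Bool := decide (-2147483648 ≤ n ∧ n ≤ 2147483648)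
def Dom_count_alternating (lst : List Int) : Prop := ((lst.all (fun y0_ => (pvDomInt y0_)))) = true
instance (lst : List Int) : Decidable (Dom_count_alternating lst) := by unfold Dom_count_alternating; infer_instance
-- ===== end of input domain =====

-- B replaces A's slicing recursion with one iterative pass over adjacent pairs (objective: simpler).

-- ===== PORT A =====
-- literal transliteration of A's recursion on lst[1:]
def count_alternating (lst : List Int) : Int :=
  match lst with
  | [] => 0
  | [_] => 1
  | a :: b :: rest =>
    let count : Int := 0
    let count := if a > 0 ∧ 0 > b then count + 1 else count
    let count := if a < 0 ∧ 0 < b then count + 1 else count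
    if a > 0 ∧ b > 0 then count + 1
    else if a < 0 ∧ b < 0 then count + 1
    else count + count_alternating (b :: rest)

-- ===== PORT B =====
-- B's while-loop over index pairs, as a tail recursion carrying (count, previous element, remaining tail)
def count_alternating_alt.go (count : Int) (a : Int) (rest : List Int) : Int :=
  match rest with
  | [] => count + 1
  | b :: rest' =>
    if (a > 0 ∧ 0 > b) ∨ (a < 0 ∧ 0 < b) then
      count_alternating_alt.go (count + 1) b rest'
    else if (a > 0 ∧ b > 0) ∨ (a < 0 ∧ b < 0) then
      count + 1
    else
      count_alternating_alt.go count b rest'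

def count_alternating_alt (lst : List Int) : Int :=
  match lst with
  | [] => 0
  | a :: rest => count_alternating_alt.go 0 a rest

-- ===== PRECONDITION & SPEC =====
def Spec_count_alternating (lst : List Int) (out : Int) : Prop := out = count_alternating_alt lst
instance (lst : List Int) (out : Int) : Decidable (Spec_count_alternating lst out) := by unfold Spec_count_alternating; infer_instance

-- ===== CLAIM (what is proved, stated in full; the proofs are below) =====
def Claim_equal_count_alternating : Prop := ∀ (lst : List Int), Dom_count_alternating lst → Spec_count_alternating lst (count_alternating lst)

-- ===== LEMMAS AND PROOFS =====
theorem count_alternating_alt_go_shift (rest : List Int) : ∀ (c a : Int),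
    count_alternating_alt.go c a rest = c + count_alternating_alt.go 0 a rest := by
  induction rest with
  | nil => intro c a; simp [count_alternating_alt.go]
  | cons b rest' ih =>
    intro c a
    simp only [count_alternating_alt.go]
    split_ifs with h1 h2
    · rw [ih (c + 1), ih (0 + 1)]; ring
    · ring
    · exact ih c b

theorem count_alternating_eq (lst : List Int) :
    count_alternating lst = count_alternating_alt lst := by
  induction lst with
  | nil => rfl
  | cons a tail ih =>
    cases tail with
    | nil => rfl
    | cons b rest =>
      have ih' : count_alternating (b :: rest) = count_alternating_alt.go 0 b rest := ih
      simp only [count_alternating, count_alternating_alt]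
      rw [count_alternating_alt_go_shift (b :: rest)]
      simp only [count_alternating_alt.go]
      split_ifs with h1 h2 h3 h4 h5 h6 h7 <;> norm_num <;>
        first
        | (exfalso; omega)
        | (rw [ih', count_alternating_alt_go_shift rest 1]; try ring)
        | (rw [ih']; try ring)

-- ===== VERDICT (by name: the statement is the Claim_ definition above) =====
theorem count_alternating_spec : Claim_equal_count_alternating := by
  intro lst _
  unfold Spec_count_alternating
  exact count_alternating_eq lst
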